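-- pv_equiv track=rewrite | github.com/oluatomi/TimetableGUI_project | Tt_algo_calc.py | singles
-- ===== SOURCE A (Python) =====
-- def singles(array):
--     """
--     This defines the 'center-cluster' algorithm for single periods.
--     It is referred to as 'center-cluster' because by design, unless it is contrained by some other factor,
--     it clusters at the center before spreading out to the edges.
--
--     """
--     if array <=0:
--         return []
--
--     run = True
--
--     # Calculating for even number of array
--     if not array % 2:
--         ans = []
--         i = 0
--
--         # Actually, on paper it was discovered that every consecutive odd-even part added up to k.
--         # That is array + 2. This is a constank 'k' in the math.
--         k = array + 2
--
--         while run: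
--             a = int((array - 4*i)/2)
--             b = k - a
--
--             if a >= 1:
--                 ans.append(a)
--
--             if b <= array:
--                 ans.append(b)
--                 i += 1
--
--             else:
--                run = False
--
--
--     # Calculating to odd number of array
--     else:
--         first = int((array + 1)/2)
--
--         ans = [first]
--         k = array + 1
--         i = 1
--
--         while run:
--             a = first - 2*i
--             b = first + 2*i
--
--             if a >= 1:
--                 ans.append(a)
--
--             if b <= array:
--                 ans.append(b)
--
--                 i += 1
--
--             else:
--                 run = False
--
--     return ans
-- ===== SOURCE B (Python) =====
-- def singles(array):
--     """Center-cluster order, computed by enumerating the candidate slots and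
--     sorting them by distance from the center (parity-dependent tie-break)."""
--     if array <= 0:
--         return []
--     odd = array % 2 == 1
--     c = (array + 1) // 2 if odd else array // 2
--
--     def key(x):
--         d = x - c
--         later = d > 0 if odd else d < 0
--         return 2 * abs(d) + (1 if later else 0)
--
--     return sorted((x for x in range(1, array + 1) if x % 2 == c % 2), key=key)
-- ===== Notes on version B (the rewrite author's own statement) =====
-- stated objective: alternative
-- what changed: Replaces A's two generative while-loops (which emit slots by stepping outward from the center with branch-dependent arithmetic) by a declarative pass: enumerate all slots of the center's parity in 1..n and sort them by distance from the center with a parity-dependent tie-break.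
import Mathlib
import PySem

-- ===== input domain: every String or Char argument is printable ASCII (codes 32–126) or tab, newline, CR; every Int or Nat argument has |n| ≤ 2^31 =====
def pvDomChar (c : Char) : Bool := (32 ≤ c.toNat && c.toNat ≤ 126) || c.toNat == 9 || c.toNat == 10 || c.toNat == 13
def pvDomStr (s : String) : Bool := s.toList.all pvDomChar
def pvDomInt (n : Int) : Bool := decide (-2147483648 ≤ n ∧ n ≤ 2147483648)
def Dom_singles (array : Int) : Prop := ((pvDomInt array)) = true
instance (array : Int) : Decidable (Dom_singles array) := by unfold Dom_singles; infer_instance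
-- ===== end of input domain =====

-- B replaces A's generative while-loops by enumerate-the-candidates-then-sort-by-distance-from-center (objective: alternative/simpler).

-- ===== PORT A =====
-- even-branch while loop; the Nat argument is a fuel bound making the recursion structural
-- (singles passes array.toNat + 2, more iterations than the loop can run; it is a totality
-- guard only, never exhausted on the loop's actual runs — see evenLoop_eq below).
def singlesEvenLoop (array k i : Int) (ans : List Int) : Nat → List Int
  | 0 => ans
  | fuel+1 =>
    let a := PySem.Int.truncdiv (array - 4*i) 2   -- int((array - 4*i)/2), exact on even differences
    let b := k - a
    let ans1 := if 1 ≤ a then ans ++ [a] else ans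
    if b ≤ array then singlesEvenLoop array k (i+1) (ans1 ++ [b]) fuel else ans1

-- odd-branch while loop, same fuel scheme
def singlesOddLoop (array first i : Int) (ans : List Int) : Nat → List Int
  | 0 => ans
  | fuel+1 =>
    let a := first - 2*i
    let b := first + 2*i
    let ans1 := if 1 ≤ a then ans ++ [a] else ans
    if b ≤ array then singlesOddLoop array first (i+1) (ans1 ++ [b]) fuel else ans1

def singles (array : Int) : List Int :=
  if array ≤ 0 then []
  else if PySem.Int.mod array 2 == 0 then
    singlesEvenLoop array (array + 2) 0 [] (array.toNat + 2)
  else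
    let first := PySem.Int.truncdiv (array + 1) 2   -- int((array + 1)/2)
    singlesOddLoop array first 1 [first] (array.toNat + 2)

-- ===== PORT B =====
def singlesAltKey (odd : Bool) (c : Int) (x : Int) : Int :=
  let d := x - c
  let later := if odd then 0 < d else d < 0
  2 * |d| + (if later then 1 else 0)

def singles_alt (array : Int) : List Int :=
  if array ≤ 0 then []
  else
    let odd := PySem.Int.mod array 2 == 1
    let c := if odd then PySem.Int.floordiv (array + 1) 2 else PySem.Int.floordiv array 2
    PySem.List.sorted
      ((PySem.List.pyRange 1 (array + 1)).filter
        (fun x => PySem.Int.mod x 2 == PySem.Int.mod c 2))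
      (singlesAltKey odd c)

-- ===== PRECONDITION & SPEC =====
def Spec_singles (array : Int) (out : List Int) : Prop := out = singles_alt array
instance (array : Int) (out : List Int) : Decidable (Spec_singles array out) := by unfold Spec_singles; infer_instance

-- ===== CLAIM (what is proved, stated in full; the proofs are below) =====
def Claim_equal_singles : Prop := ∀ (array : Int), Dom_singles array → Spec_singles array (singles array)

-- ===== LEMMAS AND PROOFS =====

-- The value A's odd-branch loop appends, starting at offset index i, for t full iterations.
def genOdd (c : Int) (i : Int) : Nat → List Int
  | 0 => []
  | t+1 => (c - 2*i) :: (c + 2*i) :: genOdd c (i+1) t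

-- Same for the even branch; the terminal iteration still appends `a` when a ≥ 1.
def genEven (c : Int) (i : Int) : Nat → List Int
  | 0 => if 2*i ≤ c - 1 then [c - 2*i] else []
  | t+1 => (c - 2*i) :: (c + 2 + 2*i) :: genEven c (i+1) t

theorem oddLoop_eq (array c : Int) (harr : array = 2*c - 1) :
    ∀ (t : Nat) (fuel : Nat) (i : Int) (ans : List Int), t < fuel →
      c - 1 < 2*(i + t) → (t = 0 ∨ 2*(i + (t:Int) - 1) ≤ c - 1) →
      singlesOddLoop array c i ans fuel = ans ++ genOdd c i t := by
  intro t
  induction t with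
  | zero =>
    intro fuel i ans hf h1 _
    obtain ⟨f, rfl⟩ : ∃ f, fuel = f + 1 := ⟨fuel - 1, by omega⟩
    push_cast at h1
    have hna : ¬ (1 ≤ c - 2*i) := by omega
    have hnb : ¬ (c + 2*i ≤ array) := by omega
    simp [singlesOddLoop, hna, hnb, genOdd]
  | succ t ih =>
    intro fuel i ans hf h1 h2
    obtain ⟨f, rfl⟩ : ∃ f, fuel = f + 1 := ⟨fuel - 1, by omega⟩
    have hstep : 2*i ≤ c - 1 := by rcases h2 with h2 | h2 <;> [omega; (push_cast at h2; omega)]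
    have ha : 1 ≤ c - 2*i := by omega
    have hb : c + 2*i ≤ array := by omega
    show (if c + 2*i ≤ array then
            singlesOddLoop array c (i+1) ((if 1 ≤ c - 2*i then ans ++ [c - 2*i] else ans) ++ [c + 2*i]) f
          else (if 1 ≤ c - 2*i then ans ++ [c - 2*i] else ans)) = ans ++ genOdd c i (t+1)
    rw [if_pos hb, if_pos ha,
        ih f (i+1) (ans ++ [c - 2*i] ++ [c + 2*i]) (by omega) (by push_cast; push_cast at h1; omega)
        (by rcases h2 with h2 | h2
            · omega
            · by_cases ht : t = 0
              · exact Or.inl ht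
              · right; push_cast at h2 ⊢; omega)]
    simp [genOdd]

theorem evenLoop_eq (array c : Int) (harr : array = 2*c) :
    ∀ (t : Nat) (fuel : Nat) (i : Int) (ans : List Int), t < fuel →
      c - 2 < 2*(i + t) → (t = 0 ∨ 2*(i + (t:Int) - 1) ≤ c - 2) →
      singlesEvenLoop array (array + 2) i ans fuel = ans ++ genEven c i t := by
  have hdiv : ∀ i : Int, PySem.Int.truncdiv (array - 4*i) 2 = c - 2*i := by
    intro i
    have : array - 4*i = 2*(c - 2*i) := by omega
    rw [PySem.Int.truncdiv, this, Int.mul_tdiv_cancel_left _ (by norm_num)]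
  intro t
  induction t with
  | zero =>
    intro fuel i ans hf h1 _
    obtain ⟨f, rfl⟩ : ∃ f, fuel = f + 1 := ⟨fuel - 1, by omega⟩
    push_cast at h1
    show (if array + 2 - PySem.Int.truncdiv (array - 4*i) 2 ≤ array then
            singlesEvenLoop array (array + 2) (i+1)
              ((if 1 ≤ PySem.Int.truncdiv (array - 4*i) 2 then ans ++ [PySem.Int.truncdiv (array - 4*i) 2] else ans)
                ++ [array + 2 - PySem.Int.truncdiv (array - 4*i) 2]) f
          else (if 1 ≤ PySem.Int.truncdiv (array - 4*i) 2 then ans ++ [PySem.Int.truncdiv (array - 4*i) 2] else ans))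
          = ans ++ genEven c i 0
    rw [hdiv]
    have hnb : ¬ (array + 2 - (c - 2*i) ≤ array) := by omega
    rw [if_neg hnb]
    by_cases ha : 1 ≤ c - 2*i
    · simp [genEven, ha, show 2*i ≤ c - 1 by omega]
    · simp [genEven, ha, show ¬ (2*i ≤ c - 1) by omega]
  | succ t ih =>
    intro fuel i ans hf h1 h2
    obtain ⟨f, rfl⟩ : ∃ f, fuel = f + 1 := ⟨fuel - 1, by omega⟩
    have hstep : 2*i ≤ c - 2 := by rcases h2 with h2 | h2 <;> [omega; (push_cast at h2; omega)]
    have ha : 1 ≤ c - 2*i := by omega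
    have hb : array + 2 - (c - 2*i) ≤ array := by omega
    show (if array + 2 - PySem.Int.truncdiv (array - 4*i) 2 ≤ array then
            singlesEvenLoop array (array + 2) (i+1)
              ((if 1 ≤ PySem.Int.truncdiv (array - 4*i) 2 then ans ++ [PySem.Int.truncdiv (array - 4*i) 2] else ans)
                ++ [array + 2 - PySem.Int.truncdiv (array - 4*i) 2]) f
          else (if 1 ≤ PySem.Int.truncdiv (array - 4*i) 2 then ans ++ [PySem.Int.truncdiv (array - 4*i) 2] else ans))
          = ans ++ genEven c i (t+1)
    rw [hdiv, if_pos hb, if_pos ha]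
    have hbv : array + 2 - (c - 2*i) = c + 2 + 2*i := by omega
    rw [hbv, ih f (i+1) (ans ++ [c - 2*i] ++ [c + 2 + 2*i]) (by omega) (by push_cast; push_cast at h1; omega)
        (by rcases h2 with h2 | h2
            · omega
            · by_cases ht : t = 0
              · exact Or.inl ht
              · right; push_cast at h2 ⊢; omega)]
    simp [genEven]

-- key computations
theorem keyOdd_lo (c j : Int) (hj : 0 ≤ j) : singlesAltKey true c (c - 2*j) = 4*j := by
  simp only [singlesAltKey]
  rw [show c - 2*j - c = -(2*j) by ring, abs_neg, abs_of_nonneg (by omega)]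
  simp only [if_true]
  rw [if_neg (by omega)]; ring

theorem keyOdd_hi (c j : Int) (hj : 1 ≤ j) : singlesAltKey true c (c + 2*j) = 4*j + 1 := by
  simp only [singlesAltKey]
  rw [show c + 2*j - c = 2*j by ring, abs_of_nonneg (by omega)]
  simp only [if_true]
  rw [if_pos (by omega)]; ring

theorem keyEven_lo (c j : Int) (hj : 1 ≤ j) : singlesAltKey false c (c - 2*j) = 4*j + 1 := by
  simp only [singlesAltKey]
  rw [show c - 2*j - c = -(2*j) by ring, abs_neg, abs_of_nonneg (by omega)]
  simp only [Bool.false_eq_true, if_false]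
  rw [if_pos (by omega)]; ring

theorem keyEven_hi (c j : Int) (hj : 0 ≤ j) : singlesAltKey false c (c + 2 + 2*j) = 4*j + 4 := by
  simp only [singlesAltKey]
  rw [show c + 2 + 2*j - c = 2*j + 2 by ring, abs_of_nonneg (by omega)]
  simp only [Bool.false_eq_true, if_false]
  rw [if_neg (by omega)]; ring

theorem key_center (b : Bool) (c : Int) : singlesAltKey b c c = 0 := by
  simp [singlesAltKey]

theorem genOdd_bound_pairwise (c : Int) :
    ∀ (t : Nat) (i : Int), 1 ≤ i →
      (∀ y ∈ genOdd c i t, 4*i ≤ singlesAltKey true c y) ∧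
      (genOdd c i t).Pairwise (fun a b => singlesAltKey true c a < singlesAltKey true c b) := by
  intro t
  induction t with
  | zero => intro i _; simp [genOdd]
  | succ t ih =>
    intro i hi
    obtain ⟨ihb, ihp⟩ := ih (i+1) (by omega)
    have klo := keyOdd_lo c i (by omega)
    have khi := keyOdd_hi c i (by omega)
    refine ⟨?_, ?_⟩
    · intro y hy
      simp only [genOdd, List.mem_cons] at hy
      rcases hy with rfl | rfl | hy
      · omega
      · omega
      · have := ihb y hy; omega
    · simp only [genOdd, List.pairwise_cons]
      refine ⟨?_, ?_, ihp⟩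
      · intro y hy
        simp only [List.mem_cons] at hy
        rcases hy with rfl | hy
        · omega
        · have := ihb y hy; omega
      · intro y hy; have := ihb y hy; omega

theorem mem_genOdd (c : Int) :
    ∀ (t : Nat) (i x : Int),
      x ∈ genOdd c i t ↔ ∃ j : Int, i ≤ j ∧ j < i + t ∧ (x = c - 2*j ∨ x = c + 2*j) := by
  intro t
  induction t with
  | zero => intro i x; simp [genOdd]; intro j h1 h2; omega
  | succ t ih =>
    intro i x
    simp only [genOdd, List.mem_cons, ih]
    constructor
    · rintro (rfl | rfl | ⟨j, h1, h2, h3⟩)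
      · exact ⟨i, by omega, by push_cast; omega, Or.inl rfl⟩
      · exact ⟨i, by omega, by push_cast; omega, Or.inr rfl⟩
      · exact ⟨j, by omega, by push_cast; push_cast at h2; omega, h3⟩
    · rintro ⟨j, h1, h2, h3⟩
      by_cases hj : j = i
      · subst hj; rcases h3 with rfl | rfl
        · exact Or.inl rfl
        · exact Or.inr (Or.inl rfl)
      · exact Or.inr (Or.inr ⟨j, by omega, by push_cast; push_cast at h2; omega, h3⟩)

theorem genEven_bound_pairwise (c : Int) :
    ∀ (t : Nat) (i : Int), 0 ≤ i →
      (∀ y ∈ genEven c i t, (if i = 0 then 0 else 4*i + 1) ≤ singlesAltKey false c y) ∧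
      (genEven c i t).Pairwise (fun a b => singlesAltKey false c a < singlesAltKey false c b) := by
  have keylo : ∀ i : Int, 0 ≤ i → singlesAltKey false c (c - 2*i) = if i = 0 then 0 else 4*i + 1 := by
    intro i hi
    by_cases h0 : i = 0
    · subst h0; simpa using key_center false c
    · rw [if_neg h0]; exact keyEven_lo c i (by omega)
  intro t
  induction t with
  | zero =>
    intro i hi
    simp only [genEven]
    split
    · constructor
      · intro y hy; simp only [List.mem_singleton] at hy; subst hy
        rw [keylo i hi]
      · simp
    · simp
  | succ t ih =>
    intro i hi
    obtain ⟨ihb, ihp⟩ := ih (i+1) (by omega)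
    rw [if_neg (show ¬(i+1 : Int) = 0 by omega)] at ihb
    have klo := keylo i hi
    have khi := keyEven_hi c i hi
    have klo_le : singlesAltKey false c (c - 2*i) ≤ 4*i + 1 := by
      rw [klo]; split <;> omega
    refine ⟨?_, ?_⟩
    · intro y hy
      simp only [genEven, List.mem_cons] at hy
      rcases hy with rfl | rfl | hy
      · rw [klo]
      · rw [khi]; split <;> omega
      · have := ihb y hy; split <;> omega
    · simp only [genEven, List.pairwise_cons]
      refine ⟨?_, ?_, ihp⟩
      · intro y hy
        simp only [List.mem_cons] at hy
        rcases hy with rfl | hy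
        · omega
        · have := ihb y hy; omega
      · intro y hy; have := ihb y hy; omega

theorem mem_genEven (c : Int) :
    ∀ (t : Nat) (i x : Int),
      x ∈ genEven c i t ↔
        ((∃ j : Int, i ≤ j ∧ j < i + t ∧ (x = c - 2*j ∨ x = c + 2 + 2*j)) ∨
         (2*(i + (t:Int)) ≤ c - 1 ∧ x = c - 2*(i + (t:Int)))) := by
  intro t
  induction t with
  | zero =>
    intro i x
    simp only [genEven, Nat.cast_zero, add_zero]
    split
    · simp only [List.mem_singleton]
      constructor
      · rintro rfl; exact Or.inr ⟨by omega, rfl⟩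
      · rintro (⟨j, h1, h2, _⟩ | ⟨_, rfl⟩)
        · omega
        · rfl
    · simp only [List.not_mem_nil, false_iff]
      rintro (⟨j, h1, h2, _⟩ | ⟨h1, _⟩)
      · omega
      · omega
  | succ t ih =>
    intro i x
    simp only [genEven, List.mem_cons, ih]
    constructor
    · rintro (rfl | rfl | (⟨j, h1, h2, h3⟩ | ⟨h1, rfl⟩))
      · exact Or.inl ⟨i, by omega, by push_cast; omega, Or.inl rfl⟩
      · exact Or.inl ⟨i, by omega, by push_cast; omega, Or.inr rfl⟩
      · exact Or.inl ⟨j, by omega, by push_cast; push_cast at h2; omega, h3⟩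
      · exact Or.inr ⟨by push_cast at h1 ⊢; omega, by push_cast; ring⟩
    · rintro (⟨j, h1, h2, h3⟩ | ⟨h1, rfl⟩)
      · by_cases hj : j = i
        · subst hj; rcases h3 with rfl | rfl
          · exact Or.inl rfl
          · exact Or.inr (Or.inl rfl)
        · exact Or.inr (Or.inr (Or.inl ⟨j, by omega, by push_cast; push_cast at h2; omega, h3⟩))
      · exact Or.inr (Or.inr (Or.inr ⟨by push_cast at h1 ⊢; omega, by push_cast; ring⟩))

-- nodup of a strictly key-increasing list
theorem nodup_of_pairwise_key_lt {key : Int → Int} {l : List Int}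
    (h : l.Pairwise (fun a b => key a < key b)) : l.Nodup :=
  h.imp (fun {a b} hab => by intro he; subst he; exact absurd hab (lt_irrefl _))

-- the candidate list of B
theorem mem_cands (lo hi m x : Int) :
    x ∈ (PySem.List.pyRange lo hi).filter (fun y => y % 2 == m % 2) ↔
      lo ≤ x ∧ x < hi ∧ x % 2 = m % 2 := by
  simp [List.mem_filter, PySem.List.mem_pyRange_one, and_assoc]

theorem nodup_cands (lo hi m : Int) :
    ((PySem.List.pyRange lo hi).filter (fun y => y % 2 == m % 2)).Nodup :=
  (PySem.List.nodup_pyRange_one lo hi).filter _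

-- odd branch, A side
theorem singles_odd (array : Int) (h0 : 0 < array) (h2 : array % 2 = 1) :
    singles array = ((array+1)/2) :: genOdd ((array+1)/2) 1 (((array+1)/2 - 1).toNat / 2) := by
  have hmod : PySem.Int.mod array 2 = array % 2 := PySem.Int.mod_eq_emod_of_pos (by norm_num)
  set c := (array+1)/2 with hc
  have harr : array = 2*c - 1 := by omega
  have htd : PySem.Int.truncdiv (array + 1) 2 = c := by
    rw [PySem.Int.truncdiv, Int.tdiv_eq_ediv_of_nonneg (by omega)]
  have hm : ¬ (array ≤ 0) := by omega
  rw [singles, if_neg hm, if_neg (by simp [hmod, h2]), htd]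
  set t := ((c - 1).toNat / 2) with ht
  have htfacts : 2 * (t:Int) ≤ c - 1 ∧ c - 1 < 2 * (t:Int) + 2 := by
    constructor <;> omega
  exact oddLoop_eq array c harr t (array.toNat + 2) 1 [c] (by omega) (by omega)
    (by by_cases h : t = 0
        · exact Or.inl h
        · right; have : 1 ≤ (t:Int) := by exact_mod_cast Nat.one_le_iff_ne_zero.mpr h
          omega)

-- even branch, A side
theorem singles_even (array : Int) (h0 : 0 < array) (h2 : array % 2 = 0) :
    singles array = genEven (array/2) 0 ((array/2).toNat / 2) := by
  have hmod : PySem.Int.mod array 2 = array % 2 := PySem.Int.mod_eq_emod_of_pos (by norm_num)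
  set c := array/2 with hc
  have harr : array = 2*c := by omega
  have hm : ¬ (array ≤ 0) := by omega
  rw [singles, if_neg hm, if_pos (by simp [hmod, h2])]
  set t := (c.toNat / 2) with ht
  have htfacts : 2 * (t:Int) ≤ c ∧ c < 2 * (t:Int) + 2 := by
    constructor <;> omega
  exact evenLoop_eq array c harr t (array.toNat + 2) 0 [] (by omega) (by omega)
    (by by_cases h : t = 0
        · exact Or.inl h
        · right; have : 1 ≤ (t:Int) := by exact_mod_cast Nat.one_le_iff_ne_zero.mpr h
          omega)

-- odd branch, B side
theorem alt_odd (array : Int) (h0 : 0 < array) (h2 : array % 2 = 1) :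
    singles_alt array = ((array+1)/2) :: genOdd ((array+1)/2) 1 (((array+1)/2 - 1).toNat / 2) := by
  have hmod : ∀ y : Int, PySem.Int.mod y 2 = y % 2 := fun y => PySem.Int.mod_eq_emod_of_pos (by norm_num)
  set c := (array+1)/2 with hc
  have harr : array = 2*c - 1 := by omega
  have hcpos : 1 ≤ c := by omega
  have hfd : PySem.Int.floordiv (array + 1) 2 = c := PySem.Int.floordiv_eq_ediv_of_pos (by norm_num)
  have hm : ¬ (array ≤ 0) := by omega
  rw [singles_alt]
  simp only [hm, if_false, hmod, h2, beq_self_eq_true, if_true, hfd]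
  set t := ((c - 1).toNat / 2) with ht
  have htfacts : 2 * (t:Int) ≤ c - 1 ∧ c - 1 < 2 * (t:Int) + 2 := ⟨by omega, by omega⟩
  obtain ⟨hbnd, hpw⟩ := genOdd_bound_pairwise c t 1 (by norm_num)
  apply PySem.List.sorted_eq_of_perm_of_pairwise_lt
  · -- permutation with the candidate list
    apply (List.perm_ext_iff_of_nodup
      (nodup_of_pairwise_key_lt (l := c :: genOdd c 1 t)
        (List.pairwise_cons.mpr ⟨fun y hy => by
            have := hbnd y hy; rw [key_center]; omega, hpw⟩))
      (nodup_cands 1 (array+1) c)).mpr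
    intro x
    rw [mem_cands, List.mem_cons, mem_genOdd]
    constructor
    · rintro (rfl | ⟨j, h1w, h2w, (rfl | rfl)⟩) <;> omega
    · rintro ⟨hx1, hx2, hxp⟩
      by_cases hxc : x = c
      · exact Or.inl hxc
      · by_cases hlt : x < c
        · exact Or.inr ⟨(c - x)/2, by omega, by omega, Or.inl (by omega)⟩
        · exact Or.inr ⟨(x - c)/2, by omega, by omega, Or.inr (by omega)⟩
  · exact List.pairwise_cons.mpr ⟨fun y hy => by
      have := hbnd y hy; rw [key_center]; omega, hpw⟩

-- even branch, B side
theorem alt_even (array : Int) (h0 : 0 < array) (h2 : array % 2 = 0) :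
    singles_alt array = genEven (array/2) 0 ((array/2).toNat / 2) := by
  have hmod : ∀ y : Int, PySem.Int.mod y 2 = y % 2 := fun y => PySem.Int.mod_eq_emod_of_pos (by norm_num)
  set c := array/2 with hc
  have harr : array = 2*c := by omega
  have hcpos : 1 ≤ c := by omega
  have hfd : PySem.Int.floordiv array 2 = c := PySem.Int.floordiv_eq_ediv_of_pos (by norm_num)
  have hm : ¬ (array ≤ 0) := by omega
  rw [singles_alt]
  simp only [hm, if_false, hmod, h2, if_true, hfd]
  norm_num
  set t := (c.toNat / 2) with ht
  have htfacts : 2 * (t:Int) ≤ c ∧ c < 2 * (t:Int) + 2 := ⟨by omega, by omega⟩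
  obtain ⟨hbnd, hpw⟩ := genEven_bound_pairwise c t 0 le_rfl
  apply PySem.List.sorted_eq_of_perm_of_pairwise_lt
  · apply (List.perm_ext_iff_of_nodup
      (nodup_of_pairwise_key_lt hpw) (nodup_cands 1 (array+1) c)).mpr
    intro x
    rw [mem_cands, mem_genEven]
    constructor
    · rintro (⟨j, h1w, h2w, (rfl | rfl)⟩ | ⟨h1w, rfl⟩) <;> omega
    · rintro ⟨hx1, hx2, hxp⟩
      by_cases hgt : c < x
      · exact Or.inl ⟨(x - c - 2)/2, by omega, by omega, Or.inr (by omega)⟩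
      · by_cases hj : (c - x)/2 < (t:Int)
        · exact Or.inl ⟨(c - x)/2, by omega, by omega, Or.inl (by omega)⟩
        · exact Or.inr ⟨by omega, by omega⟩
  · exact hpw

-- ===== VERDICT (by name: the statement is the Claim_ definition above) =====
theorem singles_spec : Claim_equal_singles := by
  intro array _
  unfold Spec_singles
  by_cases h0 : array ≤ 0
  · rw [singles, singles_alt, if_pos h0, if_pos h0]
  · push_neg at h0
    rcases Int.emod_two_eq array with h2 | h2
    · rw [singles_even array h0 h2, alt_even array h0 h2]
    · rw [singles_odd array h0 h2, alt_odd array h0 h2]
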